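-- pv_equiv track=rewrite | github.com/raeez/chiral-bar-cobar | compute/lib/swiss_cheese_chain_model.py | _count_pbw_states
-- ===== SOURCE A (Python) =====
-- from typing import Dict, List, Optional, Tuple
--
-- def _count_pbw_states(weights: List[int], target_weight: int) -> int:
--     """Count PBW basis states at a given weight.
--
--     States are indexed by occupation numbers (n_1, ..., n_r) where
--     n_i >= 0 and sum n_i * d_i = target_weight (exact weight).
--
--     For bosonic generators (all standard families), this is the number
--     of solutions to n_1*d_1 + ... + n_r*d_r = target_weight in
--     nonneg integers.
--     """
--     if target_weight < 0:
--         return 0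
--     if target_weight == 0:
--         return 1  # the vacuum
--
--     r = len(weights)
--     if r == 0:
--         return 0
--
--     # Dynamic programming: count partitions of target_weight
--     # into parts from weights (with repetition).
--     dp = [0] * (target_weight + 1)
--     dp[0] = 1
--     for w in weights:
--         if w <= 0:
--             continue
--         for j in range(w, target_weight + 1):
--             dp[j] += dp[j - w]
--
--     return dp[target_weight]
-- ===== SOURCE B (Python) =====
-- from typing import Dict, List, Optional, Tuple
--
-- def _count_pbw_states(weights: List[int], target_weight: int) -> int:
--     """Count nonnegative-integer solutions of n_1*d_1 + ... + n_r*d_r = target_weight.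
--
--     Absorbs each weight w by cumulative sums along residue classes mod w:
--     multiplying the counting series by 1/(1-x^w) turns, within each residue
--     chain dp[c], dp[c+w], dp[c+2w], ..., the coefficients into their running
--     totals.  A cumulative accumulator is swept along every chain that has at
--     least two entries (classes c with c + w <= t); single-entry chains are
--     left untouched, as a running total of one value is the value itself.
--     """
--     if target_weight < 0:
--         return 0
--     if target_weight == 0:
--         return 1
--     if len(weights) == 0:
--         return 0
--
--     t = target_weight
--     dp = [0] * (t + 1)
--     dp[0] = 1
--     for w in weights:
--         if w <= 0 or w > t:
--             continue
--         for c in range(min(w, t + 1 - w)):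
--             run = dp[c]
--             for j in range(c + w, t + 1, w):
--                 run += dp[j]
--                 dp[j] = run
--     return dp[t]
-- ===== Notes on version B (the rewrite author's own statement) =====
-- stated objective: alternative
-- what changed: Each weight w is absorbed by sweeping a cumulative running-total accumulator along every residue chain dp[c], dp[c+w], dp[c+2w], ... (prefix sums per residue class mod w, skipping single-entry chains), maintaining a running sum instead of A's dp[j] += dp[j-w] back-reference recurrence over the flat index range.
import Mathlib
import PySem

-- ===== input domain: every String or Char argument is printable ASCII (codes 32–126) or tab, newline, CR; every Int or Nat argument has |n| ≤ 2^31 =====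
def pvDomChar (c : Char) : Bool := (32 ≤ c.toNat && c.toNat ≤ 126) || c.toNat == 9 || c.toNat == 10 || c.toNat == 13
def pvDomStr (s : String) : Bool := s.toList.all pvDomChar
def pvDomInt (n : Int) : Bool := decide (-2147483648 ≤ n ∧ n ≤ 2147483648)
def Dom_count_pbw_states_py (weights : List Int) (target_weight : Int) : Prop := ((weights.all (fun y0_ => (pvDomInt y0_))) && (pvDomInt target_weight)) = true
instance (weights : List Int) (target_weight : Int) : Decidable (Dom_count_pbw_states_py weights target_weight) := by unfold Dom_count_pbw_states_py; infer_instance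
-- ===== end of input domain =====

-- B absorbs each weight by sweeping a running-total accumulator along every residue
-- chain dp[c], dp[c+w], ... (multiplication by 1/(1-x^w) = prefix sums per residue class,
-- skipping single-entry chains), instead of A's dp[j] += dp[j-w] index recurrence over the
-- flat array; objective: alternative (same asymptotic cost).

-- ===== PORT A =====
-- Python-list cell access, Array-backed for O(1) evaluation; every index the ports
-- reach is nonnegative and in range, where these are exact (negative wraparound and
-- IndexError are unreachable in both programs).
def pvAGet (a : Array Int) (i : Int) : Int :=
  if h : 0 ≤ i ∧ i.toNat < a.size then a[i.toNat] else 0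

def pvASet (a : Array Int) (i : Int) (v : Int) : Array Int :=
  if 0 ≤ i then a.setIfInBounds i.toNat v else a

-- inner 'for j in range(w, target_weight + 1): dp[j] += dp[j - w]' (with the
-- 'if w <= 0: continue' guard)
def pvInnerA (target_weight : Int) (dp : Array Int) (w : Int) : Array Int :=
  if w ≤ 0 then dp
  else
    (PySem.List.pyRange w (target_weight + 1) 1).foldl
      (fun d j => pvASet d j (pvAGet d j + pvAGet d (j - w))) dp

def count_pbw_states_py (weights : List Int) (target_weight : Int) : Int :=
  if target_weight < 0 then 0
  else if target_weight = 0 then 1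
  else if weights.length = 0 then 0
  else
    let dp0 : Array Int := pvASet (Array.replicate (target_weight + 1).toNat 0) 0 1
    let dp := weights.foldl (pvInnerA target_weight) dp0
    pvAGet dp target_weight

-- ===== PORT B =====
-- 'run = dp[c]; for j in range(c + w, t + 1, w): run += dp[j]; dp[j] = run' — the
-- cumulative sweep along the residue-c chain
def pvClassPass (t w : Int) (dp : Array Int) (c : Int) : Array Int :=
  ((PySem.List.pyRange (c + w) (t + 1) w).foldl
    (fun s j =>
      let r := s.2 + pvAGet s.1 j
      (pvASet s.1 j r, r))
    (dp, pvAGet dp c)).1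

-- 'if w <= 0 or w > t: continue' and 'for c in range(min(w, t + 1 - w)): ...'
def pvInnerB (t : Int) (dp : Array Int) (w : Int) : Array Int :=
  if w ≤ 0 ∨ t < w then dp
  else (PySem.List.pyRange 0 (min w (t + 1 - w)) 1).foldl (pvClassPass t w) dp

def count_pbw_states_py_alt (weights : List Int) (target_weight : Int) : Int :=
  if target_weight < 0 then 0
  else if target_weight = 0 then 1
  else if weights = [] then 0
  else
    let dp0 : Array Int := pvASet (Array.replicate (target_weight + 1).toNat 0) 0 1
    let dp := weights.foldl (pvInnerB target_weight) dp0
    pvAGet dp target_weight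

-- ===== PRECONDITION & SPEC =====
def Spec_count_pbw_states_py (weights : List Int) (target_weight : Int) (out : Int) : Prop := out = count_pbw_states_py_alt weights target_weight
instance (weights : List Int) (target_weight : Int) (out : Int) : Decidable (Spec_count_pbw_states_py weights target_weight out) := by unfold Spec_count_pbw_states_py; infer_instance

-- ===== CLAIM (what is proved, stated in full; the proofs are below) =====
def Claim_equal_count_pbw_states_py : Prop := ∀ (weights : List Int) (target_weight : Int), Dom_count_pbw_states_py weights target_weight → Spec_count_pbw_states_py weights target_weight (count_pbw_states_py weights target_weight)

-- ===== LEMMAS AND PROOFS =====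

-- list-level mirrors of the two passes (the proofs run on lists; the Array ports
-- are bridged to them by toList below)
def pvInnerLA (target_weight : Int) (dp : List Int) (w : Int) : List Int :=
  if w ≤ 0 then dp
  else
    (PySem.List.pyRange w (target_weight + 1) 1).foldl
      (fun d j =>
        PySem.List.pySetD d j (PySem.List.pyGetD d j 0 + PySem.List.pyGetD d (j - w) 0)) dp

def pvClassPassL (t w : Int) (dp : List Int) (c : Int) : List Int :=
  ((PySem.List.pyRange (c + w) (t + 1) w).foldl
    (fun s j =>
      (PySem.List.pySetD s.1 j (s.2 + PySem.List.pyGetD s.1 j 0),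
       s.2 + PySem.List.pyGetD s.1 j 0))
    (dp, PySem.List.pyGetD dp c 0)).1

def pvInnerLB (t : Int) (dp : List Int) (w : Int) : List Int :=
  if w ≤ 0 ∨ t < w then dp
  else (PySem.List.pyRange 0 (min w (t + 1 - w)) 1).foldl (pvClassPassL t w) dp


-- ===== A-side: one DP pass over the array =====
-- the mathematical result of one weight-w DP pass: pvExt w dp j = new dp[j]
def pvExt (w : Nat) (dp : List Int) (j : Nat) : Int :=
  if _h : 0 < w ∧ w ≤ j then dp.getD j 0 + pvExt w dp (j - w) else dp.getD j 0
termination_by j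
decreasing_by omega

-- the hybrid state mid-pass: entries below s already updated, the rest original
def pvHyb (w : Nat) (dp : List Int) (s : Nat) : List Int :=
  (List.range dp.length).map (fun i => if i < s then pvExt w dp i else dp.getD i 0)

theorem pvHyb_length (w : Nat) (dp : List Int) (s : Nat) : (pvHyb w dp s).length = dp.length := by
  simp [pvHyb]

theorem pvExt_low (w : Nat) (dp : List Int) (j : Nat) (h : j < w) : pvExt w dp j = dp.getD j 0 := by
  rw [pvExt]; simp [Nat.not_le.mpr h]

theorem pvHyb_start (w : Nat) (dp : List Int) (s : Nat) (h : s ≤ w) : pvHyb w dp s = dp := by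
  apply List.ext_getElem
  · simp [pvHyb]
  · intro i h1 h2
    simp only [pvHyb, List.getElem_map, List.getElem_range]
    rw [List.getD_eq_getElem _ _ h2]
    split
    · next hi => rw [pvExt_low w dp i (by omega), List.getD_eq_getElem _ _ h2]
    · rfl

theorem pvHyb_high (w : Nat) (dp : List Int) (s s' : Nat) (h : dp.length ≤ s) (h' : dp.length ≤ s') :
    pvHyb w dp s = pvHyb w dp s' := by
  unfold pvHyb
  apply List.map_congr_left
  intro i hi
  rw [List.mem_range] at hi
  rw [if_pos (by omega), if_pos (by omega)]

theorem pvHyb_getD (w : Nat) (dp : List Int) (s i : Nat) (hi : i < dp.length) :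
    (pvHyb w dp s).getD i 0 = if i < s then pvExt w dp i else dp.getD i 0 := by
  rw [List.getD_eq_getElem _ _ (by simpa [pvHyb] using hi)]
  simp only [pvHyb, List.getElem_map, List.getElem_range]

theorem pvStepA (w : Nat) (dp : List Int) (j : Nat) (hw : 0 < w) (hj : w ≤ j) (hlen : j < dp.length) :
    (pvHyb w dp j).set j ((pvHyb w dp j).getD j 0 + (pvHyb w dp j).getD (j - w) 0)
      = pvHyb w dp (j + 1) := by
  have hv : (pvHyb w dp j).getD j 0 + (pvHyb w dp j).getD (j - w) 0 = pvExt w dp j := by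
    rw [pvHyb_getD w dp j j hlen, pvHyb_getD w dp j (j - w) (by omega)]
    rw [if_neg (by omega), if_pos (by omega)]
    conv_rhs => rw [pvExt]
    rw [dif_pos ⟨hw, hj⟩]
  rw [hv]
  apply List.ext_getElem
  · simp [pvHyb]
  · intro i h1 h2
    rw [List.getElem_set]
    simp only [pvHyb, List.getElem_map, List.getElem_range]
    split
    · next hij => rw [if_pos (by omega), hij]
    · next hij =>
      by_cases hlt : i < j
      · rw [if_pos hlt, if_pos (by omega)]
      · rw [if_neg hlt, if_neg (by omega)]

theorem pvLoopA (w t : Int) (dp : List Int) (hw : 0 < w) (hlen : dp.length = (t + 1).toNat) :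
    ∀ n : Nat, ∀ j : Int, (t + 1 - j).toNat = n → w ≤ j →
      (PySem.List.pyRange j (t + 1) 1).foldl
        (fun d i => PySem.List.pySetD d i (PySem.List.pyGetD d i 0 + PySem.List.pyGetD d (i - w) 0))
        (pvHyb w.toNat dp j.toNat)
      = pvHyb w.toNat dp (t + 1).toNat := by
  intro n
  induction n generalizing dp with
  | zero =>
      intro j hn hj
      rw [PySem.List.pyRange_one_eq_nil (by omega), List.foldl_nil]
      exact pvHyb_high _ _ _ _ (by omega) (by omega)
  | succ m ih =>
      intro j hn hj
      have hjt : j < t + 1 := by omega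
      have h0j : (0:Int) ≤ j := by omega
      rw [PySem.List.pyRange_one_cons hjt, List.foldl_cons]
      have ej : j = ((j.toNat : Nat) : Int) := by omega
      have ejw : j - w = ((j.toNat - w.toNat : Nat) : Int) := by omega
      have hstep : PySem.List.pySetD (pvHyb w.toNat dp j.toNat) j
            (PySem.List.pyGetD (pvHyb w.toNat dp j.toNat) j 0 +
             PySem.List.pyGetD (pvHyb w.toNat dp j.toNat) (j - w) 0)
          = pvHyb w.toNat dp ((j + 1).toNat) := by
        rw [ejw, ej]
        rw [PySem.List.pySetD_natCast, PySem.List.pyGetD_natCast, PySem.List.pyGetD_natCast]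
        simp only [Int.toNat_natCast]
        rw [pvStepA w.toNat dp j.toNat (by omega) (by omega) (by omega)]
        have e2 : ((j.toNat : Int) + 1).toNat = j.toNat + 1 := by omega
        rw [e2]
      rw [hstep]
      exact ih dp hlen (j + 1) (by omega) (by omega)

-- ===== B-side: cumulative sweeps along residue chains compute the same pass =====
-- cons/nil shape of a positive-step range
theorem pvRange_nil (a b s : Int) (hs : 0 < s) (hab : b ≤ a) :
    PySem.List.pyRange a b s = [] := by
  rw [PySem.List.pyRange_of_pos _ _ hs, if_neg (by omega)]
  rfl

theorem pvRange_cons (a b s : Int) (hs : 0 < s) (hab : a < b) :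
    PySem.List.pyRange a b s = a :: PySem.List.pyRange (a + s) b s := by
  rw [PySem.List.pyRange_of_pos _ _ hs, PySem.List.pyRange_of_pos _ _ hs, if_pos hab]
  by_cases h2 : a + s < b
  · rw [if_pos h2]
    have e : ((b - a + s - 1) / s).toNat = ((b - (a + s) + s - 1) / s).toNat + 1 := by
      have e0 : b - a + s - 1 = (b - (a + s) + s - 1) + 1 * s := by ring
      rw [e0, Int.add_mul_ediv_right _ _ (by omega)]
      have hnn : 0 ≤ (b - (a + s) + s - 1) / s := Int.ediv_nonneg (by omega) (by omega)
      omega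
    rw [e, List.range_succ_eq_map, List.map_cons]
    congr 1
    · norm_num
    · rw [List.map_map]
      apply List.map_congr_left
      intro k _
      simp only [Function.comp_apply]
      push_cast
      ring
  · rw [if_neg h2]
    have e : ((b - a + s - 1) / s).toNat = 1 := by
      have h1 : (1 : Int) ≤ (b - a + s - 1) / s := by
        rw [Int.le_ediv_iff_mul_le (by omega)]
        omega
      have h2' : (b - a + s - 1) / s < 2 := by
        rw [Int.ediv_lt_iff_lt_mul (by omega)]
        omega
      omega
    rw [e]
    norm_num

-- class-c positions below j + w, other than j itself, lie below j
theorem pvClassGap (w i j : Nat) (hij : i % w = j % w) (hne : i ≠ j) (hlt : i < j + w) :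
    i < j := by
  by_contra h
  have hd1 := Nat.div_add_mod i w
  have hd2 := Nat.div_add_mod j w
  have hji : j < i := by omega
  have hBA : j / w < i / w := by
    rcases Nat.lt_or_ge (j / w) (i / w) with h | h
    · exact h
    · exfalso
      have := Nat.mul_le_mul_left w h
      omega
  have hBA' : j / w + 1 ≤ i / w := hBA
  have h2 : w * (j / w + 1) ≤ w * (i / w) := Nat.mul_le_mul_left w hBA'
  have e : w * (j / w + 1) = w * (j / w) + w := by ring
  omega

-- the only class-c position below c + w is c itself
theorem pvClassFirst (w i c : Nat) (hic : i % w = c) (hlt : i < c + w) : i = c := by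
  have hd := Nat.div_add_mod i w
  by_cases hq : i / w = 0
  · rw [hq, Nat.mul_zero] at hd
    omega
  · have h1 : 1 ≤ i / w := Nat.one_le_iff_ne_zero.mpr hq
    have h2 : w * 1 ≤ w * (i / w) := Nat.mul_le_mul_left w h1
    omega

-- mid-sweep states: classes below c fully updated, class c updated below j, the rest original
def pvHybC (w : Nat) (dp : List Int) (c : Nat) : List Int :=
  (List.range dp.length).map (fun i => if i % w < c then pvExt w dp i else dp.getD i 0)

def pvHybJ (w : Nat) (dp : List Int) (c : Nat) (j : Nat) : List Int :=
  (List.range dp.length).map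
    (fun i => if i % w < c ∨ (i % w = c ∧ i < j) then pvExt w dp i else dp.getD i 0)

theorem pvHybC_getD (w : Nat) (dp : List Int) (c i : Nat) (hi : i < dp.length) :
    (pvHybC w dp c).getD i 0 = if i % w < c then pvExt w dp i else dp.getD i 0 := by
  rw [List.getD_eq_getElem _ _ (by simpa [pvHybC] using hi)]
  simp only [pvHybC, List.getElem_map, List.getElem_range]

theorem pvHybJ_getD (w : Nat) (dp : List Int) (c j i : Nat) (hi : i < dp.length) :
    (pvHybJ w dp c j).getD i 0
      = if i % w < c ∨ (i % w = c ∧ i < j) then pvExt w dp i else dp.getD i 0 := by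
  rw [List.getD_eq_getElem _ _ (by simpa [pvHybJ] using hi)]
  simp only [pvHybJ, List.getElem_map, List.getElem_range]

theorem pvHybC_zero (w : Nat) (dp : List Int) : pvHybC w dp 0 = dp := by
  apply List.ext_getElem
  · simp [pvHybC]
  · intro i h1 h2
    simp only [pvHybC, List.getElem_map, List.getElem_range]
    rw [if_neg (by omega), List.getD_eq_getElem _ _ h2]

theorem pvHybJ_start (w : Nat) (dp : List Int) (c : Nat) (hc : c < w) :
    pvHybJ w dp c (c + w) = pvHybC w dp c := by
  apply List.ext_getElem
  · simp [pvHybJ, pvHybC]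
  · intro i h1 h2
    simp only [pvHybJ, pvHybC, List.getElem_map, List.getElem_range]
    by_cases hlow : i % w < c
    · rw [if_pos (Or.inl hlow), if_pos hlow]
    · rw [if_neg hlow]
      by_cases hmid : i % w = c ∧ i < c + w
      · rw [if_pos (Or.inr hmid)]
        have hic : i = c := pvClassFirst w i c hmid.1 hmid.2
        subst hic
        rw [pvExt_low w dp i (by omega)]
      · rw [if_neg (by tauto)]

theorem pvHybJ_end (w : Nat) (dp : List Int) (c X : Nat) (hX : dp.length ≤ X) :
    pvHybJ w dp c X = pvHybC w dp (c + 1) := by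
  apply List.ext_getElem
  · simp [pvHybJ, pvHybC]
  · intro i h1 h2
    simp only [pvHybJ, pvHybC, List.getElem_map, List.getElem_range]
    have hiX : i < X := by
      have : i < dp.length := by simpa [pvHybJ] using h1
      omega
    by_cases hc : i % w < c + 1
    · rw [if_pos hc]
      by_cases hlt : i % w < c
      · rw [if_pos (Or.inl hlt)]
      · have hm : i % w = c := by omega
        rw [if_pos (Or.inr ⟨hm, hiX⟩)]
    · have hnot : ¬ (i % w < c ∨ (i % w = c ∧ i < X)) := by
        rintro (h | ⟨ha, _⟩) <;> omega
      rw [if_neg hc, if_neg hnot]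

theorem pvStepB (w : Nat) (dp : List Int) (c j : Nat) (hw : 0 < w) (hjc : j % w = c)
    (hwj : w ≤ j) (hlen : j < dp.length) :
    (pvHybJ w dp c j).set j (pvExt w dp (j - w) + (pvHybJ w dp c j).getD j 0)
      = pvHybJ w dp c (j + w) := by
  have hget : (pvHybJ w dp c j).getD j 0 = dp.getD j 0 := by
    rw [pvHybJ_getD w dp c j j hlen, if_neg]
    rintro (h | ⟨_, h2⟩) <;> omega
  have hv : pvExt w dp (j - w) + (pvHybJ w dp c j).getD j 0 = pvExt w dp j := by
    rw [hget]
    conv_rhs => rw [pvExt]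
    rw [dif_pos ⟨hw, hwj⟩]
    ring
  rw [hv]
  apply List.ext_getElem
  · simp [pvHybJ]
  · intro i h1 h2
    rw [List.getElem_set]
    simp only [pvHybJ, List.getElem_map, List.getElem_range]
    by_cases hij : j = i
    · subst hij
      rw [if_pos rfl, if_pos (Or.inr ⟨hjc, by omega⟩)]
    · rw [if_neg hij]
      by_cases hcond : i % w < c ∨ (i % w = c ∧ i < j)
      · have hc2 : i % w < c ∨ (i % w = c ∧ i < j + w) := by
          rcases hcond with h | ⟨ha, hb⟩
          · exact Or.inl h
          · exact Or.inr ⟨ha, by omega⟩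
        rw [if_pos hcond, if_pos hc2]
      · rw [if_neg hcond, if_neg]
        rintro (h | ⟨ha, hb⟩)
        · exact hcond (Or.inl h)
        · have : i < j := pvClassGap w i j (by omega) (fun he => hij he.symm) hb
          exact hcond (Or.inr ⟨ha, this⟩)

theorem pvChainLoop (w t : Int) (dp : List Int) (hw : 0 < w) (hlen : dp.length = (t + 1).toNat)
    (c : Nat) :
    ∀ n : Nat, ∀ j : Int, (t + 1 - j).toNat = n → w ≤ j → j.toNat % w.toNat = c →
      ((PySem.List.pyRange j (t + 1) w).foldl
        (fun s jj =>
          (PySem.List.pySetD s.1 jj (s.2 + PySem.List.pyGetD s.1 jj 0),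
           s.2 + PySem.List.pyGetD s.1 jj 0))
        (pvHybJ w.toNat dp c j.toNat, pvExt w.toNat dp (j.toNat - w.toNat))).1
      = pvHybC w.toNat dp (c + 1) := by
  intro n
  induction n using Nat.strong_induction_on with
  | _ n ih =>
    intro j hn hwj hjc
    by_cases hend : t + 1 ≤ j
    · rw [pvRange_nil _ _ _ (by omega) hend, List.foldl_nil]
      exact pvHybJ_end w.toNat dp c j.toNat (by omega)
    · rw [pvRange_cons _ _ _ (by omega) (by omega), List.foldl_cons]
      have ej : j = ((j.toNat : Nat) : Int) := by omega
      have hjlen : j.toNat < dp.length := by omega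
      have hstep : PySem.List.pySetD (pvHybJ w.toNat dp c j.toNat) j
            (pvExt w.toNat dp (j.toNat - w.toNat) +
              PySem.List.pyGetD (pvHybJ w.toNat dp c j.toNat) j 0)
          = pvHybJ w.toNat dp c ((j + w).toNat) := by
        rw [ej, PySem.List.pySetD_natCast, PySem.List.pyGetD_natCast]
        simp only [Int.toNat_natCast]
        rw [List.getD_eq_getElem _ _ (by simpa [pvHybJ] using hjlen)]
        rw [← List.getD_eq_getElem _ _ (by simpa [pvHybJ] using hjlen)]
        rw [pvStepB w.toNat dp c j.toNat (by omega) hjc (by omega) hjlen]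
        congr 1
        omega
      have hrun : pvExt w.toNat dp (j.toNat - w.toNat) +
            PySem.List.pyGetD (pvHybJ w.toNat dp c j.toNat) j 0
          = pvExt w.toNat dp ((j + w).toNat - w.toNat) := by
        have hget : PySem.List.pyGetD (pvHybJ w.toNat dp c j.toNat) j 0 = dp.getD j.toNat 0 := by
          rw [ej, PySem.List.pyGetD_natCast]
          simp only [Int.toNat_natCast]
          rw [pvHybJ_getD w.toNat dp c j.toNat j.toNat hjlen, if_neg]
          rintro (h | ⟨_, h2⟩) <;> omega
        rw [hget, show (j + w).toNat - w.toNat = j.toNat from by omega]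
        conv_rhs => rw [pvExt]
        rw [dif_pos ⟨by omega, by omega⟩]
        ring
      rw [hstep, hrun]
      exact ih (t + 1 - (j + w)).toNat (by omega) (j + w) rfl (by omega)
        (by rw [show (j + w).toNat = j.toNat + w.toNat from by omega, Nat.add_mod_right]; exact hjc)

theorem pvClassPassLemma (w t : Int) (dp : List Int) (hw : 0 < w) (hwt : w ≤ t)
    (hlen : dp.length = (t + 1).toNat) (c : Int) (h0c : 0 ≤ c) (hcK : c < min w (t + 1 - w)) :
    pvClassPassL t w (pvHybC w.toNat dp c.toNat) c = pvHybC w.toNat dp (c.toNat + 1) := by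
  unfold pvClassPassL
  have hcw : c.toNat < w.toNat := by omega
  have hclen : c.toNat < dp.length := by omega
  have hmod : (c + w).toNat % w.toNat = c.toNat := by
    rw [show (c + w).toNat = c.toNat + w.toNat from by omega, Nat.add_mod_right]
    exact Nat.mod_eq_of_lt hcw
  have hinit : PySem.List.pyGetD (pvHybC w.toNat dp c.toNat) c 0
      = pvExt w.toNat dp ((c + w).toNat - w.toNat) := by
    have e1 : (c + w).toNat - w.toNat = c.toNat := by omega
    rw [e1]
    rw [show c = ((c.toNat : Nat) : Int) from by omega, PySem.List.pyGetD_natCast]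
    simp only [Int.toNat_natCast]
    rw [pvHybC_getD w.toNat dp c.toNat c.toNat hclen]
    rw [if_neg (by rw [Nat.mod_eq_of_lt hcw]; omega)]
    exact (pvExt_low w.toNat dp c.toNat hcw).symm
  have hJ : pvHybC w.toNat dp c.toNat = pvHybJ w.toNat dp c.toNat ((c + w).toNat) := by
    rw [show (c + w).toNat = c.toNat + w.toNat from by omega]
    exact (pvHybJ_start w.toNat dp c.toNat hcw).symm
  rw [hinit]
  conv_lhs => rw [hJ]
  rw [pvChainLoop w t dp hw hlen c.toNat (t + 1 - (c + w)).toNat (c + w) rfl (by omega) hmod]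

theorem pvClassLoop (w t : Int) (dp : List Int) (hw : 0 < w) (hwt : w ≤ t)
    (hlen : dp.length = (t + 1).toNat) :
    ∀ n : Nat, ∀ c : Int, 0 ≤ c → c ≤ min w (t + 1 - w) → (min w (t + 1 - w) - c).toNat = n →
      (PySem.List.pyRange c (min w (t + 1 - w)) 1).foldl (pvClassPassL t w) (pvHybC w.toNat dp c.toNat)
      = pvHybC w.toNat dp (min w (t + 1 - w)).toNat := by
  intro n
  induction n with
  | zero =>
      intro c h0c hcK hn
      rw [PySem.List.pyRange_one_eq_nil (by omega), List.foldl_nil]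
      congr 1
      omega
  | succ m ih =>
      intro c h0c hcK hn
      rw [PySem.List.pyRange_one_cons (by omega), List.foldl_cons]
      rw [pvClassPassLemma w t dp hw hwt hlen c h0c (by omega)]
      have e : c.toNat + 1 = (c + 1).toNat := by omega
      rw [e]
      exact ih (c + 1) (by omega) (by omega) (by omega)

theorem pvHybC_end (w t : Int) (dp : List Int) (hw : 0 < w) (hwt : w ≤ t)
    (hlen : dp.length = (t + 1).toNat) :
    pvHybC w.toNat dp (min w (t + 1 - w)).toNat = pvHyb w.toNat dp (t + 1).toNat := by
  apply List.ext_getElem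
  · simp [pvHybC, pvHyb]
  · intro i h1 h2
    have hi : i < dp.length := by simpa [pvHybC] using h1
    simp only [pvHybC, pvHyb, List.getElem_map, List.getElem_range]
    rw [if_pos (show i < (t + 1).toNat from by omega)]
    by_cases hc : i % w.toNat < (min w (t + 1 - w)).toNat
    · rw [if_pos hc]
    · rw [if_neg hc]
      have hiw : i < w.toNat := by
        by_contra hge
        have hml : i % w.toNat < w.toNat := Nat.mod_lt _ (by omega)
        rcases le_total w (t + 1 - w) with hmm | hmm
        · have hev : (min w (t + 1 - w)).toNat = w.toNat := by rw [min_eq_left hmm]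
          omega
        · have hev : (min w (t + 1 - w)).toNat = (t + 1 - w).toNat := by rw [min_eq_right hmm]
          have hd := Nat.div_add_mod i w.toNat
          have h1' : 1 ≤ i / w.toNat := (Nat.one_le_div_iff (by omega)).mpr (by omega)
          have h2' : w.toNat * 1 ≤ w.toNat * (i / w.toNat) := Nat.mul_le_mul_left _ h1'
          omega
      exact (pvExt_low w.toNat dp i (by omega)).symm

-- ===== the two passes agree =====
theorem pvInnerLA_len (t : Int) (dp : List Int) (w : Int) (hlen : dp.length = (t + 1).toNat) :
    (pvInnerLA t dp w).length = (t + 1).toNat := by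
  unfold pvInnerLA
  by_cases hw : w ≤ 0
  · rw [if_pos hw]; exact hlen
  · rw [if_neg hw]
    by_cases hwt : t < w
    · rw [PySem.List.pyRange_one_eq_nil (by omega), List.foldl_nil]; exact hlen
    · conv_lhs => rw [(pvHyb_start w.toNat dp w.toNat le_rfl).symm]
      rw [pvLoopA w t dp (by omega) hlen (t + 1 - w).toNat w rfl le_rfl, pvHyb_length, hlen]

theorem pvInner_eq (t : Int) (dp : List Int) (w : Int) (hlen : dp.length = (t + 1).toNat) :
    pvInnerLB t dp w = pvInnerLA t dp w := by
  unfold pvInnerLA pvInnerLB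
  by_cases hw : w ≤ 0
  · rw [if_pos (Or.inl hw), if_pos hw]
  · by_cases hwt : t < w
    · rw [if_pos (Or.inr hwt), if_neg hw, PySem.List.pyRange_one_eq_nil (by omega), List.foldl_nil]
    · rw [if_neg (by omega : ¬ (w ≤ 0 ∨ t < w)), if_neg hw]
      conv_rhs => rw [(pvHyb_start w.toNat dp w.toNat le_rfl).symm]
      rw [pvLoopA w t dp (by omega) hlen (t + 1 - w).toNat w rfl le_rfl]
      conv_lhs => rw [(pvHybC_zero w.toNat dp).symm]
      rw [show (0 : Nat) = (0 : Int).toNat from rfl]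
      rw [pvClassLoop w t dp (by omega) (by omega) hlen (min w (t + 1 - w) - 0).toNat 0 (by omega) (by omega) rfl]
      exact pvHybC_end w t dp (by omega) (by omega) hlen

theorem pvFold_eq (t : Int) :
    ∀ (ws : List Int) (dp : List Int), dp.length = (t + 1).toNat →
      ws.foldl (pvInnerLA t) dp = ws.foldl (pvInnerLB t) dp := by
  intro ws
  induction ws with
  | nil => intro dp _; rfl
  | cons x xs ih =>
      intro dp hlen
      simp only [List.foldl_cons]
      rw [← pvInner_eq t dp x hlen]
      exact ih _ (by rw [pvInner_eq t dp x hlen]; exact pvInnerLA_len t dp x hlen)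


-- ===== bridging the Array ports to the list-level proofs =====
theorem pvAGet_eq (a : Array Int) (i : Int) (h : 0 ≤ i) :
    pvAGet a i = PySem.List.pyGetD a.toList i 0 := by
  unfold pvAGet
  rw [PySem.List.pyGetD_of_nonneg _ _ h]
  by_cases hin : i.toNat < a.size
  · rw [dif_pos ⟨h, hin⟩, List.getD_eq_getElem _ _ (by simpa using hin), Array.getElem_toList]
  · rw [dif_neg (fun hc => hin hc.2), List.getD_eq_default _ _ (by simpa using hin)]

theorem pvASet_toList (a : Array Int) (i v : Int) (h : 0 ≤ i) :
    (pvASet a i v).toList = PySem.List.pySetD a.toList i v := by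
  unfold pvASet
  rw [if_pos h, PySem.List.pySetD_of_nonneg _ _ h, Array.toList_setIfInBounds]

theorem pvInnerA_toList (t : Int) (arr : Array Int) (w : Int) :
    (pvInnerA t arr w).toList = pvInnerLA t arr.toList w := by
  unfold pvInnerA pvInnerLA
  by_cases hw : w ≤ 0
  · rw [if_pos hw, if_pos hw]
  · rw [if_neg hw, if_neg hw]
    have key : ∀ (l : List Int), (∀ x ∈ l, w ≤ x) → ∀ (a : Array Int),
        (l.foldl (fun d j => pvASet d j (pvAGet d j + pvAGet d (j - w))) a).toList
        = l.foldl (fun d j =>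
            PySem.List.pySetD d j (PySem.List.pyGetD d j 0 + PySem.List.pyGetD d (j - w) 0))
            a.toList := by
      intro l
      induction l with
      | nil => intro _ a; rfl
      | cons x xs ih =>
          intro hl a
          have hx : w ≤ x := hl x (by simp)
          rw [List.foldl_cons, List.foldl_cons, ih (fun y hy => hl y (by simp [hy]))]
          rw [pvASet_toList _ _ _ (by omega), pvAGet_eq _ _ (by omega), pvAGet_eq _ _ (by omega)]
    exact key _ (fun x hx => (PySem.List.mem_pyRange_one.mp hx).1) arr

theorem pvClassPass_toList (t w : Int) (arr : Array Int) (c : Int) (h0c : 0 ≤ c) (hw : 0 < w) :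
    (pvClassPass t w arr c).toList = pvClassPassL t w arr.toList c := by
  unfold pvClassPass pvClassPassL
  have key : ∀ (l : List Int), (∀ x ∈ l, 0 ≤ x) → ∀ (a : Array Int) (r : Int),
      ((l.foldl (fun s j =>
          let r' := s.2 + pvAGet s.1 j
          (pvASet s.1 j r', r')) (a, r)).1).toList
      = (l.foldl (fun s j =>
          (PySem.List.pySetD s.1 j (s.2 + PySem.List.pyGetD s.1 j 0),
           s.2 + PySem.List.pyGetD s.1 j 0)) (a.toList, r)).1 := by
    intro l
    induction l with
    | nil => intro _ a r; rfl
    | cons x xs ih =>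
        intro hl a r
        have hx : (0 : Int) ≤ x := hl x (by simp)
        rw [List.foldl_cons, List.foldl_cons]
        show ((xs.foldl _ (pvASet a x (r + pvAGet a x), r + pvAGet a x)).1).toList = _
        rw [ih (fun y hy => hl y (by simp [hy]))]
        rw [pvASet_toList _ _ _ hx, pvAGet_eq _ _ hx]
  have hmem : ∀ x ∈ PySem.List.pyRange (c + w) (t + 1) w, (0 : Int) ≤ x := by
    intro x hx
    rw [PySem.List.pyRange_of_pos _ _ hw] at hx
    rcases List.mem_map.mp hx with ⟨k, _, rfl⟩
    have := mul_nonneg (le_of_lt hw) (Int.natCast_nonneg k)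
    omega
  rw [key _ hmem arr (pvAGet arr c), pvAGet_eq _ _ h0c]

theorem pvInnerB_toList (t : Int) (arr : Array Int) (w : Int) :
    (pvInnerB t arr w).toList = pvInnerLB t arr.toList w := by
  unfold pvInnerB pvInnerLB
  by_cases hcond : w ≤ 0 ∨ t < w
  · rw [if_pos hcond, if_pos hcond]
  · rw [if_neg hcond, if_neg hcond]
    have hw : 0 < w := by omega
    have key : ∀ (l : List Int), (∀ x ∈ l, 0 ≤ x) → ∀ a : Array Int,
        (l.foldl (pvClassPass t w) a).toList = l.foldl (pvClassPassL t w) a.toList := by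
      intro l
      induction l with
      | nil => intro _ a; rfl
      | cons x xs ih =>
          intro hl a
          rw [List.foldl_cons, List.foldl_cons, ih (fun y hy => hl y (by simp [hy]))]
          rw [pvClassPass_toList t w a x (hl x (by simp)) hw]
    exact key _ (fun x hx => (PySem.List.mem_pyRange_one.mp hx).1) arr

theorem pvFoldA_toList (t : Int) (ws : List Int) : ∀ arr : Array Int,
    (ws.foldl (pvInnerA t) arr).toList = ws.foldl (pvInnerLA t) arr.toList := by
  induction ws with
  | nil => intro arr; rfl
  | cons x xs ih =>
      intro arr
      rw [List.foldl_cons, List.foldl_cons, ih, pvInnerA_toList]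

theorem pvFoldB_toList (t : Int) (ws : List Int) : ∀ arr : Array Int,
    (ws.foldl (pvInnerB t) arr).toList = ws.foldl (pvInnerLB t) arr.toList := by
  induction ws with
  | nil => intro arr; rfl
  | cons x xs ih =>
      intro arr
      rw [List.foldl_cons, List.foldl_cons, ih, pvInnerB_toList]

-- ===== VERDICT (by name: the statement is the Claim_ definition above) =====
theorem count_pbw_states_py_spec : Claim_equal_count_pbw_states_py := by
  intro weights t _
  unfold Spec_count_pbw_states_py count_pbw_states_py count_pbw_states_py_alt
  by_cases h1 : t < 0
  · simp [h1]
  by_cases h2 : t = 0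
  · simp [h2]
  simp only [if_neg h1, if_neg h2]
  by_cases h3 : weights = []
  · simp [h3]
  · have hne : weights.length ≠ 0 := by simpa [List.length_eq_zero_iff] using h3
    simp only [if_neg hne, if_neg h3]
    have hlen : (PySem.List.pySetD (List.replicate (t + 1).toNat (0 : Int)) 0 1).length
        = (t + 1).toNat := by
      simp [PySem.List.length_pySetD]
    have e0 : (pvASet (Array.replicate (t + 1).toNat 0) 0 1).toList
        = PySem.List.pySetD (List.replicate (t + 1).toNat 0) 0 1 := by
      rw [pvASet_toList _ _ _ (by norm_num), Array.toList_replicate]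
    rw [pvAGet_eq _ _ (by omega), pvAGet_eq _ _ (by omega)]
    rw [pvFoldA_toList, pvFoldB_toList, e0]
    rw [pvFold_eq t weights _ hlen]
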